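-- pv_equiv track=rewrite | github.com/cernyfili/FAV_UPS_semestralka_ZS_23_24 | GameClient/src/shared/constants.py | is_combination_in_list
-- ===== SOURCE A (Python) =====
-- class Combination(list):
--     _ELEMENT_DATA_TYPE = int
--
--     def __init__(self, elements):
--         if not all(isinstance(element, self._ELEMENT_DATA_TYPE) for element in elements):
--             raise ValueError("All elements must be integers")
--         super().__init__(elements)
--
-- def is_combination_in_list(combination: Combination, cube_list) -> bool:
--     cube_list_copy = cube_list.copy()
--     for value in combination:
--         if value in cube_list_copy:
--             cube_list_copy.remove(value)
--         else:
--             return False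
--     return True
-- ===== SOURCE B (Python) =====
-- def is_combination_in_list(combination, cube_list) -> bool:
--     need = {}
--     for v in combination:
--         need[v] = need.get(v, 0) + 1
--     have = {}
--     for v in cube_list:
--         have[v] = have.get(v, 0) + 1
--     return all(c <= have.get(v, 0) for v, c in need.items())
-- ===== Notes on version B (the rewrite author's own statement) =====
-- stated objective: alternative
-- what changed: Replaces the scan-and-remove loop over a mutable copy of cube_list with two multiplicity tables (dicts) built in one pass each, then a single comparison of counts per distinct value.
import Mathlib
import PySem

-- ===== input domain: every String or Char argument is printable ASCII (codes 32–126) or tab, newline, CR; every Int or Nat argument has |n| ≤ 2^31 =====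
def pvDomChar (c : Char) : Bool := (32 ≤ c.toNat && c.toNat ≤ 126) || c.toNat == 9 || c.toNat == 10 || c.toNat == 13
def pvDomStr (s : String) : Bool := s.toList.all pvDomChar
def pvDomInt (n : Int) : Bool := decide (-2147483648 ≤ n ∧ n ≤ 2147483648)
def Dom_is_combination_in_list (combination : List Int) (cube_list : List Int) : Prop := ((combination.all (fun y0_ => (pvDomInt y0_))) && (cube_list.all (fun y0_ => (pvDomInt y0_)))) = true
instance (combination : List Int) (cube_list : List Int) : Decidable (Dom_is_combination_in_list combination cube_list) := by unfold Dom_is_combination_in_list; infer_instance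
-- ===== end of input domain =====

-- B replaces A's scan-and-remove loop (linear search + remove per element) with two
-- count tables built in one pass each, then a per-value count comparison (no mutation).

-- ===== PORT A =====
-- the loop `for value in combination: if value in copy: copy.remove(value) else: return False`
def isCombGo : List Int → List Int → Bool
  | [], _ => true
  | v :: rest, c => if v ∈ c then isCombGo rest (c.erase v) else false

def is_combination_in_list (combination : List Int) (cube_list : List Int) : Bool :=
  isCombGo combination cube_list

-- ===== PORT B =====
def is_combination_in_list_alt (combination : List Int) (cube_list : List Int) : Bool :=
  let need := combination.foldl (fun d v => d.insert v (d.getD v 0 + 1)) (PySem.Dict.empty : PySem.Dict Int Int)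
  let have_ := cube_list.foldl (fun d v => d.insert v (d.getD v 0 + 1)) (PySem.Dict.empty : PySem.Dict Int Int)
  need.items.all (fun vc => vc.2 ≤ have_.getD vc.1 0)

-- ===== PRECONDITION & SPEC =====
def Spec_is_combination_in_list (combination : List Int) (cube_list : List Int) (out : Bool) : Prop := out = is_combination_in_list_alt combination cube_list
instance (combination : List Int) (cube_list : List Int) (out : Bool) : Decidable (Spec_is_combination_in_list combination cube_list out) := by unfold Spec_is_combination_in_list; infer_instance

-- ===== CLAIM (what is proved, stated in full; the proofs are below) =====
def Claim_equal_is_combination_in_list : Prop := ∀ (combination : List Int) (cube_list : List Int), Dom_is_combination_in_list combination cube_list → Spec_is_combination_in_list combination cube_list (is_combination_in_list combination cube_list)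

-- ===== LEMMAS AND PROOFS =====

theorem isCombGo_iff (comb : List Int) : ∀ (cube : List Int),
    isCombGo comb cube = true ↔ ∀ w : Int, comb.count w ≤ cube.count w := by
  induction comb with
  | nil => intro cube; simp [isCombGo]
  | cons v rest ih =>
    intro cube
    by_cases hv : v ∈ cube
    · have hpos : 0 < cube.count v := List.count_pos_iff.mpr hv
      simp only [isCombGo, if_pos hv, ih]
      constructor
      · intro h w
        have := h w
        rw [List.count_erase] at this
        by_cases hw : w = v
        · subst hw; simp at this ⊢; omega
        · rw [if_neg (by simpa using fun h' : v = w => hw h'.symm)] at this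
          have hvw : v ≠ w := fun h' => hw h'.symm
          simp [hvw] at this ⊢; omega
      · intro h w
        rw [List.count_erase]
        by_cases hw : w = v
        · subst hw
          have := h w
          simp at this
          simp; omega
        · have := h w
          rw [if_neg (by simpa using fun h' : v = w => hw h'.symm)]
          have hvw : v ≠ w := fun h' => hw h'.symm
          simp [hvw] at this; omega
    · simp only [isCombGo, if_neg hv]
      have h0 : cube.count v = 0 := by
        simpa using List.count_eq_zero_of_not_mem hv
      constructor
      · intro h; cases h
      · intro h
        have := h v
        simp [h0] at this
  
theorem alt_iff (comb cube : List Int) :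
    is_combination_in_list_alt comb cube = true ↔ ∀ w : Int, comb.count w ≤ cube.count w := by
  unfold is_combination_in_list_alt
  simp only [PySem.Dict.foldl_insert_getD_add_one_eq_counter, PySem.Dict.items_counter,
    List.all_eq_true, List.mem_map, PySem.Dict.getD_counter]
  constructor
  · intro h w
    by_cases hw : w ∈ comb
    · have := h (w, (comb.count w : Int)) ⟨w, by simp [PySem.Set.mem_ofList, hw]⟩
      simp at this
      exact_mod_cast this
    · simp [List.count_eq_zero_of_not_mem hw]
  · rintro h p ⟨k, hk, rfl⟩
    simp only [decide_eq_true_eq]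
    exact_mod_cast h k

-- ===== VERDICT (by name: the statement is the Claim_ definition above) =====
theorem is_combination_in_list_spec : Claim_equal_is_combination_in_list := by
  intro comb cube _
  unfold Spec_is_combination_in_list
  rw [Bool.eq_iff_iff, show is_combination_in_list comb cube = isCombGo comb cube from rfl,
    isCombGo_iff, alt_iff]
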